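-- pv_equiv track=rewrite | github.com/pypi-data/pypi-mirror-385 | packages/pmarlo/pmarlo-0.1.1.dev9-py3-none-any.whl/pmarlo/analysis/discretize.py | _lengths_to_segments
-- ===== SOURCE A (Python) =====
-- from typing import Any, Dict, Iterable, List, Mapping, MutableMapping, Sequence
--
-- def _lengths_to_segments(
--     lengths: Sequence[int], total_frames: int
-- ) -> list[tuple[int, int]]:
--     segments: list[tuple[int, int]] = []
--     offset = 0
--     for value in lengths:
--         try:
--             length_int = int(value)
--         except Exception:
--             continue
--         if length_int <= 0:
--             continue
--         start = offset
--         stop = min(total_frames, offset + length_int)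
--         if stop > start:
--             segments.append((start, stop))
--         offset = stop
--         if offset >= total_frames:
--             break
--     if not segments:
--         segments.append((0, total_frames))
--     return segments
-- ===== SOURCE B (Python) =====
-- from bisect import bisect_left
-- from itertools import accumulate
--
--
-- def _lengths_to_segments(lengths, total_frames):
--     stops = list(accumulate(int(v) for v in lengths if int(v) > 0))
--     # stops is strictly increasing, so bisect gives the first stop >= total_frames
--     k = bisect_left(stops, total_frames)
--     kept = stops[: k + 1]
--     if kept and kept[-1] > total_frames:
--         kept[-1] = total_frames
--     segments = [(a, b) for a, b in zip([0] + kept, kept) if b > a]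
--     return segments or [(0, total_frames)]
-- ===== Notes on version B (the rewrite author's own statement) =====
-- stated objective: alternative
-- what changed: B replaces A's stateful offset-threading loop with early break by a staged pipeline: accumulate the positive lengths into a strictly increasing list of cumulative stops, binary-search (bisect_left) the first stop reaching total_frames, slice the list there, clamp only the last stop, and zip the stops with their shifted predecessors into segments.
import Mathlib
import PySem

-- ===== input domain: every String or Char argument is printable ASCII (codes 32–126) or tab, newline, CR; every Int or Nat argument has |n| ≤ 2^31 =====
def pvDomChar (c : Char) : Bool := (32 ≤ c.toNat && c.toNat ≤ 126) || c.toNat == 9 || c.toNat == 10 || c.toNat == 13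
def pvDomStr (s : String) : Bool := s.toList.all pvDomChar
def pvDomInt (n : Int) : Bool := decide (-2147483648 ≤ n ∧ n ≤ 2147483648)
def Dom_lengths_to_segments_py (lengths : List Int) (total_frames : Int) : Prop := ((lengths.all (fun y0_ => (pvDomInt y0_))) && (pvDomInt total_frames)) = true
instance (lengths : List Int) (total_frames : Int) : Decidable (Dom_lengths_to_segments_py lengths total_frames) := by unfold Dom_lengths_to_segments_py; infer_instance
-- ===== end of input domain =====

-- B builds segments by accumulate + bisect + slice + clamp + zip instead of A's
-- offset-threading loop with an early break; alternative staged decomposition, same O(n).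


-- ===== PORT A =====
-- A's for-loop with `offset` state, early break and append, as structural recursion.
def pvALoop (lengths : List Int) (total_frames : Int) (segments : List (Int × Int)) (offset : Int) : List (Int × Int) :=
  match lengths with
  | [] => segments
  | value :: rest =>
    -- int(value) on an int is value; it never raises
    let length_int := value
    if length_int ≤ 0 then pvALoop rest total_frames segments offset
    else
      let start := offset
      let stop := min total_frames (offset + length_int)
      let segments' := if stop > start then segments ++ [(start, stop)] else segments
      if stop ≥ total_frames then segments' else pvALoop rest total_frames segments' stop

def lengths_to_segments_py (lengths : List Int) (total_frames : Int) : List (Int × Int) :=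
  let segments := pvALoop lengths total_frames [] 0
  if segments = [] then [(0, total_frames)] else segments

-- ===== PORT B =====
def lengths_to_segments_py_alt (lengths : List Int) (total_frames : Int) : List (Int × Int) :=
  -- itertools.accumulate of the positive lengths = scanl (+) 0 without the leading 0
  let stops := ((lengths.filter (fun v => 0 < v)).scanl (· + ·) 0).drop 1
  -- bisect_left: leftmost insertion point of total_frames; `stops` is strictly
  -- increasing, so this is exactly the length of the prefix of stops < total_frames
  let k := (stops.takeWhile (fun v => v < total_frames)).length
  let kept := stops.take (k + 1)
  -- kept[-1] = total_frames when it overshoots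
  let kept2 := match kept.getLast? with
    | some l => if l > total_frames then kept.dropLast ++ [total_frames] else kept
    | none => kept
  -- zip([0] + kept, kept) filtered to strictly increasing pairs
  let segments := ((0 :: kept2).zip kept2).filter (fun p => p.1 < p.2)
  if segments = [] then [(0, total_frames)] else segments

-- ===== PRECONDITION & SPEC =====
def Spec_lengths_to_segments_py (lengths : List Int) (total_frames : Int) (out : List (Int × Int)) : Prop := out = lengths_to_segments_py_alt lengths total_frames
instance (lengths : List Int) (total_frames : Int) (out : List (Int × Int)) : Decidable (Spec_lengths_to_segments_py lengths total_frames out) := by unfold Spec_lengths_to_segments_py; infer_instance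

-- ===== CLAIM (what is proved, stated in full; the proofs are below) =====
def Claim_equal_lengths_to_segments_py : Prop := ∀ (lengths : List Int) (total_frames : Int), Dom_lengths_to_segments_py lengths total_frames → Spec_lengths_to_segments_py lengths total_frames (lengths_to_segments_py lengths total_frames)

-- ===== LEMMAS AND PROOFS =====

-- proof-only abbreviation of B's staged core, generalized over the previous stop `prev`
def pvStage (stops : List Int) (total_frames prev : Int) : List (Int × Int) :=
  let k := (stops.takeWhile (fun v => v < total_frames)).length
  let kept := stops.take (k + 1)
  let kept2 := match kept.getLast? with
    | some l => if l > total_frames then kept.dropLast ++ [total_frames] else kept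
    | none => kept
  ((prev :: kept2).zip kept2).filter (fun p => p.1 < p.2)

-- proof-only intermediate loop over the cumulative stops
def pvAux (stops : List Int) (total_frames : Int) (prev : Int) (segments : List (Int × Int)) : List (Int × Int) :=
  match stops with
  | [] => segments
  | stop :: rest =>
    let s := min stop total_frames
    let segments' := if s > prev then segments ++ [(prev, s)] else segments
    if s ≥ total_frames then segments' else pvAux rest total_frames s segments'

-- A's loop from any offset equals the intermediate loop over the cumulative sums of the
-- remaining positive lengths started at that offset.
theorem pvALoop_eq_aux (lengths : List Int) (total_frames : Int) :
    ∀ (offset : Int) (segments : List (Int × Int)),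
    pvALoop lengths total_frames segments offset =
      pvAux (((lengths.filter (fun v => 0 < v)).scanl (· + ·) offset).drop 1)
        total_frames offset segments := by
  induction lengths with
  | nil => intro offset segments; simp [pvALoop, pvAux]
  | cons v rest ih =>
    intro offset segments
    by_cases hv : v ≤ 0
    · have : ¬ (0 < v) := by omega
      simp only [pvALoop, List.filter_cons, this]
      simp only [hv, if_pos]
      exact ih offset segments
    · have hv' : 0 < v := by omega
      have hsc : ∀ (l : List Int) (a : Int),
          List.scanl (· + ·) a l = a :: (List.scanl (· + ·) a l).drop 1 := by
        intro l a; cases l <;> simp [List.scanl_cons]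
      simp only [pvALoop, if_neg hv, List.filter_cons, hv', decide_true, if_pos,
        List.scanl_cons, List.drop_succ_cons, List.drop_zero]
      rw [hsc]
      simp only [pvAux]
      rw [min_comm (offset + v) total_frames]
      set stop := min total_frames (offset + v) with hstop
      by_cases hbr : stop ≥ total_frames
      · simp [hbr]
      · have hstop_eq : stop = offset + v := by
          rcases min_cases total_frames (offset + v) with ⟨h1, _⟩ | ⟨h1, _⟩ <;> omega
        simp only [if_neg hbr]
        rw [ih stop, hstop_eq]

-- the cumulative stops of a list of positive lengths form a strictly increasing chain
theorem pvChain (lengths : List Int) :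
    ∀ a : Int, List.Chain (· < ·) a (((lengths.filter (fun v => 0 < v)).scanl (· + ·) a).drop 1) := by
  induction lengths with
  | nil => intro a; simp only [List.filter_nil, List.scanl_nil, List.drop_succ_cons, List.drop_nil]; exact List.Chain.nil
  | cons v rest ih =>
    intro a
    by_cases hv : 0 < v
    · have hsc : ∀ (l : List Int) (b : Int),
          List.scanl (· + ·) b l = b :: (List.scanl (· + ·) b l).drop 1 := by
        intro l b; cases l <;> simp [List.scanl_cons]
      simp only [List.filter_cons, hv, decide_true, if_pos, List.scanl_cons,
        List.drop_succ_cons, List.drop_zero]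
      rw [hsc]
      exact List.Chain.cons (by omega) (ih (a + v))
    · simp only [List.filter_cons, hv, decide_false]
      exact ih a
  
-- the intermediate loop equals B's staged pipeline on a strictly increasing chain
theorem pvAux_eq_stage (total_frames : Int) :
    ∀ (stops : List Int) (prev : Int) (segments : List (Int × Int)),
    List.Chain (· < ·) prev stops →
    pvAux stops total_frames prev segments = segments ++ pvStage stops total_frames prev := by
  intro stops
  induction stops with
  | nil => intro prev segments _; simp [pvAux, pvStage]
  | cons stop rest ih =>
    intro prev segments hch
    rcases List.chain_cons.mp hch with ⟨hps, hch'⟩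
    by_cases hlt : stop < total_frames
    · -- stop below total_frames: s = stop, append (prev, stop), recurse
      have hmin : min stop total_frames = stop := by omega
      have hrec : pvStage (stop :: rest) total_frames prev
          = (prev, stop) :: pvStage rest total_frames stop := by
        unfold pvStage
        simp only [List.takeWhile_cons, hlt, decide_true, if_pos, List.length_cons,
          List.take_succ_cons]
        cases hr : rest.take ((rest.takeWhile (fun v => v < total_frames)).length + 1) with
        | nil =>
          have hns : ¬ stop > total_frames := by omega
          simp [hns, hps]
        | cons x t =>
          have hne : x :: t ≠ [] := by simp
          rw [List.getLast?_cons_cons]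
          cases hgl : (x :: t).getLast? with
          | none => simp at hgl
          | some l =>
            by_cases hcl : l > total_frames
            · simp [hcl, List.dropLast_cons_of_ne_nil hne, hps]
            · simp [hcl, List.filter_cons, hps]
      rw [hrec]
      simp only [pvAux, hmin]
      have h1 : stop > prev := hps
      have h2 : ¬ stop ≥ total_frames := by omega
      simp only [h1, if_pos, h2, if_neg, not_false_iff]
      rw [ih stop (segments ++ [(prev, stop)]) hch']
      simp
    · -- stop reaches total_frames: clamp to total_frames and finish
      have hmin : min stop total_frames = total_frames := by omega
      have hstage : pvStage (stop :: rest) total_frames prev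
          = if prev < total_frames then [(prev, total_frames)] else [] := by
        unfold pvStage
        have : ¬ stop < total_frames := hlt
        simp only [List.takeWhile_cons, this, decide_false, List.take_succ_cons]
        by_cases hcl : stop > total_frames
        · simp [List.getLast?_singleton, hcl, List.zip_cons_cons, List.filter_cons]
        · have : stop = total_frames := by omega
          simp [List.getLast?_singleton, this, List.zip_cons_cons, List.filter_cons]
      rw [hstage]
      simp only [pvAux, hmin, ge_iff_le, le_refl, if_pos]
      by_cases hp : total_frames > prev
      · simp [hp, gt_iff_lt]
      · have : ¬ prev < total_frames := by omega
        simp [hp]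

-- ===== VERDICT (by name: the statement is the Claim_ definition above) =====
theorem lengths_to_segments_py_spec : Claim_equal_lengths_to_segments_py := by
  intro lengths total_frames _
  unfold Spec_lengths_to_segments_py lengths_to_segments_py lengths_to_segments_py_alt
  rw [pvALoop_eq_aux, pvAux_eq_stage total_frames _ 0 [] (pvChain lengths 0)]
  rfl
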